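-- pv_equiv track=rewrite | github.com/DiamondLightSource/Opt-ID | IDSort/src/v2/id_setup.py | create_flip_matrix_list_symmetric_apple_q3
-- ===== SOURCE A (Python) =====
-- def create_flip_matrix_list_symmetric_apple_q3(nperiods):
--     flip = []
--     for i in range(0, (4 * nperiods - 1) - 3, 4):
--         flip.append(((-1,0,0),(0,-1,0),(0,0,1)))
--         flip.append(((1,0,0),(0,1,0),(0,0,1)))
--         flip.append(((-1,0,0),(0,-1,0),(0,0,1)))
--         flip.append(((1,0,0),(0,1,0),(0,0,1)))
--
--
--     # Append last elements
--
--     flip.append(((-1,0,0),(0,-1,0),(0,0,1)))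
--     flip.append(((1,0,0),(0,1,0),(0,0,1)))
--     flip.append(((-1,0,0),(0,-1,0),(0,0,1)))
--
--     return flip
-- ===== SOURCE B (Python) =====
-- def create_flip_matrix_list_symmetric_apple_q3(nperiods):
--     neg = ((-1, 0, 0), (0, -1, 0), (0, 0, 1))
--     pos = ((1, 0, 0), (0, 1, 0), (0, 0, 1))
--     length = 4 * max(0, nperiods - 1) + 3
--     return [neg if j % 2 == 0 else pos for j in range(length)]
-- ===== Notes on version B (the rewrite author's own statement) =====
-- stated objective: simpler
-- what changed: Replaces the block-of-four loop plus three trailing appends with a closed-form output length computed from nperiods and a single parity-indexed comprehension that alternates the two fixed matrices.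
import Mathlib
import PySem

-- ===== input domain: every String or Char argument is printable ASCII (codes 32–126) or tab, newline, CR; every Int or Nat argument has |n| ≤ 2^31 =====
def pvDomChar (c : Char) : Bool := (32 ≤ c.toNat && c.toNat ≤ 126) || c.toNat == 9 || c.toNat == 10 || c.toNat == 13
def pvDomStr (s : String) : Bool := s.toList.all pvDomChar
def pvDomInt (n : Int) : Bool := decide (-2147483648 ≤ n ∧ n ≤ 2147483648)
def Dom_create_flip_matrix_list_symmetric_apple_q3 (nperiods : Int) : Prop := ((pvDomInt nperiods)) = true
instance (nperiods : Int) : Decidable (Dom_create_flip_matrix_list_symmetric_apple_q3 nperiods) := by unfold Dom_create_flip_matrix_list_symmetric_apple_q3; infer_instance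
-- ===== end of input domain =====

-- B replaces A's block-of-4 loop plus three trailing appends by a closed-form length and one
-- parity-indexed fill (objective: simpler); return values agree for every Int nperiods.

-- ===== PORT A =====
-- literal transliteration: loop over range(0, (4*nperiods-1)-3, 4) appending four matrices,
-- then append the last three elements
def create_flip_matrix_list_symmetric_apple_q3 (nperiods : Int) : List ((Int × Int × Int) × (Int × Int × Int) × (Int × Int × Int)) :=
  let flip : List ((Int × Int × Int) × (Int × Int × Int) × (Int × Int × Int)) := []
  let flip := (PySem.List.pyRange 0 ((4 * nperiods - 1) - 3) 4).foldl
    (fun flip _i =>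
      let flip := flip ++ [((-1,0,0),(0,-1,0),(0,0,1))]
      let flip := flip ++ [((1,0,0),(0,1,0),(0,0,1))]
      let flip := flip ++ [((-1,0,0),(0,-1,0),(0,0,1))]
      flip ++ [((1,0,0),(0,1,0),(0,0,1))]) flip
  let flip := flip ++ [((-1,0,0),(0,-1,0),(0,0,1))]
  let flip := flip ++ [((1,0,0),(0,1,0),(0,0,1))]
  flip ++ [((-1,0,0),(0,-1,0),(0,0,1))]

-- ===== PORT B =====
def create_flip_matrix_list_symmetric_apple_q3_alt (nperiods : Int) : List ((Int × Int × Int) × (Int × Int × Int) × (Int × Int × Int)) :=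
  let neg : (Int × Int × Int) × (Int × Int × Int) × (Int × Int × Int) := ((-1,0,0),(0,-1,0),(0,0,1))
  let pos : (Int × Int × Int) × (Int × Int × Int) × (Int × Int × Int) := ((1,0,0),(0,1,0),(0,0,1))
  let length : Int := 4 * max 0 (nperiods - 1) + 3
  (List.range length.toNat).map (fun j => if j % 2 == 0 then neg else pos)

-- ===== PRECONDITION & SPEC =====
def Spec_create_flip_matrix_list_symmetric_apple_q3 (nperiods : Int) (out : List ((Int × Int × Int) × (Int × Int × Int) × (Int × Int × Int))) : Prop := out = create_flip_matrix_list_symmetric_apple_q3_alt nperiods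
instance (nperiods : Int) (out : List ((Int × Int × Int) × (Int × Int × Int) × (Int × Int × Int))) : Decidable (Spec_create_flip_matrix_list_symmetric_apple_q3 nperiods out) := by unfold Spec_create_flip_matrix_list_symmetric_apple_q3; infer_instance

-- ===== CLAIM (what is proved, stated in full; the proofs are below) =====
def Claim_equal_create_flip_matrix_list_symmetric_apple_q3 : Prop := ∀ (nperiods : Int), Dom_create_flip_matrix_list_symmetric_apple_q3 nperiods → Spec_create_flip_matrix_list_symmetric_apple_q3 nperiods (create_flip_matrix_list_symmetric_apple_q3 nperiods)

-- ===== LEMMAS AND PROOFS =====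

-- the alternating list of length 4k+3 is k blocks of four followed by the three trailing matrices
theorem pv_alt_blocks (k : Nat) :
    (List.range (4*k+3)).map (fun j => if j % 2 == 0 then (((-1,0,0),(0,-1,0),(0,0,1)) : (Int × Int × Int) × (Int × Int × Int) × (Int × Int × Int)) else ((1,0,0),(0,1,0),(0,0,1)))
    = (List.range k).foldl
        (fun acc _ => acc ++ [((-1,0,0),(0,-1,0),(0,0,1)), ((1,0,0),(0,1,0),(0,0,1)), ((-1,0,0),(0,-1,0),(0,0,1)), ((1,0,0),(0,1,0),(0,0,1))]) []
      ++ [((-1,0,0),(0,-1,0),(0,0,1)), ((1,0,0),(0,1,0),(0,0,1)), ((-1,0,0),(0,-1,0),(0,0,1))] := by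
  induction k with
  | zero => decide
  | succ k ih =>
    have h1 : 4*(k+1)+3 = (4*k+3)+4 := by omega
    rw [h1, List.range_add, List.map_append, ih]
    conv_rhs => rw [List.range_succ, List.foldl_append]
    have hr4 : List.range 4 = [0, 1, 2, 3] := by decide
    have h2 : (4*k+3+0) % 2 = 1 := by omega
    have h3 : (4*k+3+1) % 2 = 0 := by omega
    have h4 : (4*k+3+2) % 2 = 1 := by omega
    have h5 : (4*k+3+3) % 2 = 0 := by omega
    rw [hr4]
    simp [h2, h3, h4, h5, List.append_assoc]

theorem create_flip_matrix_list_symmetric_apple_q3_eq (nperiods : Int) :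
    create_flip_matrix_list_symmetric_apple_q3 nperiods = create_flip_matrix_list_symmetric_apple_q3_alt nperiods := by
  unfold create_flip_matrix_list_symmetric_apple_q3 create_flip_matrix_list_symmetric_apple_q3_alt
  rw [PySem.List.pyRange_of_pos 0 ((4 * nperiods - 1) - 3) (by norm_num)]
  have hif : (if (0:Int) < 4 * nperiods - 1 - 3 then ((4 * nperiods - 1 - 3 - 0 + 4 - 1) / 4).toNat else 0)
      = (nperiods - 1).toNat := by split_ifs with h <;> omega
  have hlen : ((4 : Int) * max 0 (nperiods - 1) + 3).toNat = 4 * (nperiods - 1).toNat + 3 := by omega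
  simp only [List.foldl_map, hif, hlen]
  conv_rhs => rw [pv_alt_blocks]
  have hfold : ∀ (l : List Nat) (init : List ((Int × Int × Int) × (Int × Int × Int) × (Int × Int × Int))),
      l.foldl (fun flip _ => (((flip ++ [((-1,0,0),(0,-1,0),(0,0,1))]) ++ [((1,0,0),(0,1,0),(0,0,1))]) ++ [((-1,0,0),(0,-1,0),(0,0,1))]) ++ [((1,0,0),(0,1,0),(0,0,1))]) init
      = l.foldl (fun acc _ => acc ++ [((-1,0,0),(0,-1,0),(0,0,1)), ((1,0,0),(0,1,0),(0,0,1)), ((-1,0,0),(0,-1,0),(0,0,1)), ((1,0,0),(0,1,0),(0,0,1))]) init := by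
    intro l
    induction l with
    | nil => intro init; rfl
    | cons x xs ih =>
      intro init
      simp only [List.foldl_cons, ih]
      congr 1
      simp
  rw [hfold]
  simp [List.append_assoc]

-- ===== VERDICT (by name: the statement is the Claim_ definition above) =====
theorem create_flip_matrix_list_symmetric_apple_q3_spec : Claim_equal_create_flip_matrix_list_symmetric_apple_q3 := by
  intro nperiods _
  exact create_flip_matrix_list_symmetric_apple_q3_eq nperiods
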